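-- pv_equiv track=rewrite | github.com/KordianD/Advent-of-Code-2018 | solutions/day2.py | part_one
-- ===== SOURCE A (Python) =====
-- def part_one(data_input: list) -> int:
--     how_many_twos: int = 0
--     how_many_threes: int = 0
--     for line in data_input:
--         founded_twos, founded_tree = calculate_how_many_twos_and_threes(line)
--         how_many_twos += founded_twos
--         how_many_threes += founded_tree
--
--     return how_many_threes * how_many_twos
--
-- def calculate_how_many_twos_and_threes(line: list) -> tuple:
--     dictionary: dict = {}
--     for elem in line:
--         if elem not in dictionary:
--             dictionary[elem] = 1
--         else:
--             dictionary[elem] += 1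
--
--     return int(2 in dictionary.values()), int(3 in dictionary.values())
-- ===== SOURCE B (Python) =====
-- def part_one(data_input: list) -> int:
--     how_many_twos = 0
--     how_many_threes = 0
--     for line in data_input:
--         runs = run_lengths(sorted(line))
--         how_many_twos += 1 if 2 in runs else 0
--         how_many_threes += 1 if 3 in runs else 0
--     return how_many_threes * how_many_twos
--
-- def run_lengths(s: list) -> list:
--     # run lengths of the consecutive equal blocks of s (s already sorted)
--     if not s:
--         return []
--     if len(s) == 1:
--         return [1]
--     r = run_lengths(s[1:])
--     if s[0] == s[1]:
--         return [r[0] + 1] + r[1:]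
--     return [1] + r
-- ===== Notes on version B (the rewrite author's own statement) =====
-- stated objective: alternative
-- what changed: Replaced the per-line hash-dict frequency table (build dict, test 2/3 in values) by sort-then-recursive run-length scan: each line is sorted and the lengths of consecutive equal runs are computed, and 2/3 are looked up among those run lengths.
import Mathlib
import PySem

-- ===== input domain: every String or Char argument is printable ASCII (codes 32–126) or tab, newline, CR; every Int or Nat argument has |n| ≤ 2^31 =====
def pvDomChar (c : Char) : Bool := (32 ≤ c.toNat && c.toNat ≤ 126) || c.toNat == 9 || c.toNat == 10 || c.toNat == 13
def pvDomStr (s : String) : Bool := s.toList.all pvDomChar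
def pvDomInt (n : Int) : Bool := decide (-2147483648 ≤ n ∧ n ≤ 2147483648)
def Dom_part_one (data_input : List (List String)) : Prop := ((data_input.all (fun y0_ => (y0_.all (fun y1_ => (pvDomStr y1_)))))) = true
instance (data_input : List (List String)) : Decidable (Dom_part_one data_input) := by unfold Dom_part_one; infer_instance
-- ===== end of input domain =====

-- B replaces A's per-line hash-dict frequency table by a sort + recursive run-length scan (alternative algorithm, same results).

-- ===== PORT A =====
-- calculate_how_many_twos_and_threes: dict-count the line, then int(2 in values), int(3 in values)
def calcTwosThrees (line : List String) : Int × Int :=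
  let d : PySem.Dict String Int :=
    line.foldl (fun d e => if d.contains e = false then d.insert e 1 else d.modify e 0 (· + 1))
      PySem.Dict.empty
  ((if (2 : Int) ∈ d.values then 1 else 0), (if (3 : Int) ∈ d.values then 1 else 0))

def part_one (data_input : List (List String)) : Int :=
  let p := data_input.foldl
    (fun acc line =>
      let r := calcTwosThrees line
      (acc.1 + r.1, acc.2 + r.2)) ((0 : Int), (0 : Int))
  p.2 * p.1

-- ===== PORT B =====
-- run_lengths(s): r[0] / r[1:] are headD 0 / tail (r is provably nonempty at those uses)
def runLengths : List String → List Int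
  | [] => []
  | [_] => [1]
  | x :: y :: t =>
      let r := runLengths (y :: t)
      if x = y then (r.headD 0 + 1) :: r.tail else 1 :: r

def part_one_alt (data_input : List (List String)) : Int :=
  let p := data_input.foldl
    (fun acc line =>
      let runs := runLengths (PySem.List.sorted line (fun x => x) false)
      (acc.1 + (if (2 : Int) ∈ runs then 1 else 0),
       acc.2 + (if (3 : Int) ∈ runs then 1 else 0))) ((0 : Int), (0 : Int))
  p.2 * p.1

-- ===== PRECONDITION & SPEC =====
def Spec_part_one (data_input : List (List String)) (out : Int) : Prop := out = part_one_alt data_input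
instance (data_input : List (List String)) (out : Int) : Decidable (Spec_part_one data_input out) := by unfold Spec_part_one; infer_instance

-- ===== CLAIM (what is proved, stated in full; the proofs are below) =====
def Claim_equal_part_one : Prop := ∀ (data_input : List (List String)), Dom_part_one data_input → Spec_part_one data_input (part_one data_input)

-- ===== LEMMAS AND PROOFS =====

-- A's dict-building loop body is Counter's
lemma foldA_eq_counter (line : List String) :
    line.foldl (fun d e => if d.contains e = false then d.insert e 1 else d.modify e 0 (· + 1))
      PySem.Dict.empty = PySem.Dict.counter line := by
  rw [PySem.Dict.counter_eq_foldl]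
  congr 1
  funext d e
  by_cases h : d.contains e
  · simp [h]
  · simp only [Bool.not_eq_true] at h
    simp [h, PySem.Dict.modify, PySem.Dict.getD_of_not_contains d (0 : Int) h]

lemma values_foldA (line : List String) (k : Int) :
    (k ∈ (line.foldl (fun d e => if d.contains e = false then d.insert e 1 else d.modify e 0 (· + 1))
      PySem.Dict.empty).values) ↔ ∃ x ∈ line, (line.count x : Int) = k := by
  rw [foldA_eq_counter]
  constructor
  · intro h
    simp only [PySem.Dict.values, PySem.Dict.items_counter, List.map_map, List.mem_map,
      Function.comp] at h
    obtain ⟨x, hx, hk⟩ := h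
    exact ⟨x, (PySem.Set.mem_ofList _ _).1 hx, hk⟩
  · rintro ⟨x, hx, hk⟩
    simp only [PySem.Dict.values, PySem.Dict.items_counter, List.map_map, List.mem_map,
      Function.comp]
    exact ⟨x, (PySem.Set.mem_ofList _ _).2 hx, hk⟩

lemma discard_of_not_mem {α : Type} [BEq α] [LawfulBEq α] (s : PySem.Set α) (x : α)
    (h : x ∉ s) : PySem.Set.discard s x = s := by
  apply List.filter_eq_self.2
  intro a ha
  simp only [Bool.not_eq_eq_eq_not, Bool.not_true, beq_eq_false_iff_ne]
  exact fun he => h (he ▸ ha)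

-- run lengths of a sorted list = the multiplicities of its distinct elements
lemma runLengths_sorted (s : List String) (h : s.Pairwise (· ≤ ·)) :
    runLengths s = (PySem.Set.ofList s).map (fun x => (s.count x : Int)) := by
  induction s with
  | nil => rfl
  | cons x xs ih =>
    rcases List.pairwise_cons.1 h with ⟨hx, hxs⟩
    cases xs with
    | nil => simp [runLengths, PySem.Set.ofList_cons, PySem.Set.discard]
    | cons y t =>
      have ih' := ih hxs
      rw [PySem.Set.ofList_cons] at ih'
      by_cases hxy : x = y
      · -- x ∈ y :: t, the head run grows
        subst hxy
        have hcons : PySem.Set.ofList (x :: x :: t) = x :: PySem.Set.discard (PySem.Set.ofList t) x := by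
          rw [PySem.Set.ofList_cons, PySem.Set.ofList_cons]
          simp [PySem.Set.discard, List.filter_filter]
        rw [hcons]
        simp only [runLengths, ih']
        simp only [List.map_cons, List.headD_cons, List.tail_cons, if_true]
        congr 1
        · push_cast [List.count_cons_self]
          ring
        · apply List.map_congr_left
          intro z hz
          have hzx : z ≠ x := ((PySem.Set.mem_discard _ _ _).1 hz).2
          simp only [List.count_cons_of_ne (Ne.symm hzx)]
      · -- x < everything in y :: t, a fresh run of length 1
        have hxnot : x ∉ y :: t := by
          intro hmem
          rcases List.mem_cons.1 hmem with h1 | h2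
          · exact hxy h1
          · have h1 : x ≤ y := hx y (by simp)
            have h2' : y ≤ x := (List.pairwise_cons.1 hxs).1 x h2
            exact hxy (le_antisymm h1 h2')
        have hcons : PySem.Set.ofList (x :: y :: t) = x :: PySem.Set.ofList (y :: t) := by
          rw [PySem.Set.ofList_cons,
            discard_of_not_mem _ _ (fun hm => hxnot ((PySem.Set.mem_ofList _ _).1 hm))]
        rw [hcons]
        simp only [runLengths, if_neg hxy, ih', List.map_cons, PySem.Set.ofList_cons]
        congr 1
        · rw [List.count_cons_self, List.count_eq_zero_of_not_mem hxnot]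
          norm_num
        congr 1
        · simp only [List.count_cons_of_ne hxy]
        · apply List.map_congr_left
          intro z hz
          have hz' : z ∈ y :: t := by
            have := (PySem.Set.mem_discard _ _ _).1 hz
            exact List.mem_cons_of_mem _ ((PySem.Set.mem_ofList _ _).1 this.1)
          have hzx : x ≠ z := fun he => hxnot (he ▸ hz')
          simp only [List.count_cons_of_ne hzx]

lemma mem_runLengths_sorted (line : List String) (k : Int) :
    (k ∈ runLengths (PySem.List.sorted line (fun x => x) false)) ↔
      ∃ x ∈ line, (line.count x : Int) = k := by
  rw [runLengths_sorted _ (PySem.List.sorted_pairwise line (fun x => x))]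
  have hperm := PySem.List.sorted_perm line (fun x => x) false
  constructor
  · intro h
    obtain ⟨x, hx, hk⟩ := List.mem_map.1 h
    refine ⟨x, hperm.mem_iff.1 ((PySem.Set.mem_ofList _ _).1 hx), ?_⟩
    rwa [hperm.count_eq] at hk
  · rintro ⟨x, hx, hk⟩
    refine List.mem_map.2 ⟨x, (PySem.Set.mem_ofList _ _).2 (hperm.mem_iff.2 hx), ?_⟩
    rwa [hperm.count_eq]

lemma line_eq (line : List String) :
    calcTwosThrees line =
      ((if (2 : Int) ∈ runLengths (PySem.List.sorted line (fun x => x) false) then 1 else 0),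
       (if (3 : Int) ∈ runLengths (PySem.List.sorted line (fun x => x) false) then 1 else 0)) := by
  simp only [calcTwosThrees]
  rw [if_congr (Iff.trans (values_foldA line 2) (mem_runLengths_sorted line 2).symm) rfl rfl,
    if_congr (Iff.trans (values_foldA line 3) (mem_runLengths_sorted line 3).symm) rfl rfl]

-- ===== VERDICT (by name: the statement is the Claim_ definition above) =====
theorem part_one_spec : Claim_equal_part_one := by
  intro data_input _
  unfold Spec_part_one part_one part_one_alt
  have hf : (fun (acc : Int × Int) (line : List String) =>
      let r := calcTwosThrees line
      (acc.1 + r.1, acc.2 + r.2)) =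
      (fun (acc : Int × Int) (line : List String) =>
        let runs := runLengths (PySem.List.sorted line (fun x => x) false)
        (acc.1 + (if (2 : Int) ∈ runs then 1 else 0),
         acc.2 + (if (3 : Int) ∈ runs then 1 else 0))) := by
    funext acc line
    simp only [line_eq line]
  rw [hf]
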